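-- pv_equiv track=rewrite | github.com/iiishop/SmartWorkmate | smartworkmate/acceptance_spec/lexer.py | _advance_position
-- ===== SOURCE A (Python) =====
-- def _advance_position(text: str, line: int, col: int) -> tuple[int, int]:
--     for char in text:
--         if char == "\n":
--             line += 1
--             col = 1
--         else:
--             col += 1
--     return line, col
-- ===== SOURCE B (Python) =====
-- def _advance_position(text: str, line: int, col: int) -> tuple[int, int]:
--     n = text.count("\n")
--     if n == 0:
--         return line, col + len(text)
--     return line + n, len(text) - text.rfind("\n")
-- ===== Notes on version B (the rewrite author's own statement) =====
-- stated objective: simpler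
-- what changed: Replaces the per-character loop with per-char branching by two C-level string scans: line advances by text.count('\n') and col is computed arithmetically (col+len(text) if no newline, else len(text)-text.rfind('\n')).
import Mathlib
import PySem

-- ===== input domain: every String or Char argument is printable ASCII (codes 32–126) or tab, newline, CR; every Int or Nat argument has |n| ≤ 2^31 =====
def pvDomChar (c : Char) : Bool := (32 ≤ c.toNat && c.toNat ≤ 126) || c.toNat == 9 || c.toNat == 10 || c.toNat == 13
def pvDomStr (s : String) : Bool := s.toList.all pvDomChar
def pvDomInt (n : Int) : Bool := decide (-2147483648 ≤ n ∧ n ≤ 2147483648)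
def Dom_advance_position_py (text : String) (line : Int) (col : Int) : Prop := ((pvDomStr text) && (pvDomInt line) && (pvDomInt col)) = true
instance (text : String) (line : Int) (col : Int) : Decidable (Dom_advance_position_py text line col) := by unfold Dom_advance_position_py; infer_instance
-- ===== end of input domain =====

-- B replaces A's per-character loop by two whole-string scans (count and rfind) plus arithmetic; simpler control flow, same results.

-- ===== PORT A =====
-- for char in text: if char == "\n": line += 1; col = 1 else: col += 1
def advance_position_py (text : String) (line : Int) (col : Int) : Int × Int :=
  text.toList.foldl (fun st c => if c = '\n' then (st.1 + 1, 1) else (st.1, st.2 + 1)) (line, col)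

-- ===== PORT B =====
-- n = text.count("\n"); if n == 0: (line, col + len(text)) else (line + n, len(text) - text.rfind("\n"))
def advance_position_py_alt (text : String) (line : Int) (col : Int) : Int × Int :=
  let n : Nat := PySem.Str.count text "\n"
  if n = 0 then (line, col + PySem.Str.len text)
  else (line + (n : Int), PySem.Str.len text - PySem.Str.rfind text "\n")

-- ===== PRECONDITION & SPEC =====
def Spec_advance_position_py (text : String) (line : Int) (col : Int) (out : Int × Int) : Prop := out = advance_position_py_alt text line col
instance (text : String) (line : Int) (col : Int) (out : Int × Int) : Decidable (Spec_advance_position_py text line col out) := by unfold Spec_advance_position_py; infer_instance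

-- ===== CLAIM (what is proved, stated in full; the proofs are below) =====
def Claim_equal_advance_position_py : Prop := ∀ (text : String) (line : Int) (col : Int), Dom_advance_position_py text line col → Spec_advance_position_py text line col (advance_position_py text line col)

-- ===== LEMMAS AND PROOFS =====
theorem countGo_singleton (l : List Char) : ∀ (fuel acc : Nat), l.length ≤ fuel →
    PySem.Chars.count.go ['\n'] fuel l acc = acc + l.count '\n' := by
  induction l with
  | nil =>
    intro fuel acc _
    cases fuel <;> simp [PySem.Chars.count.go]
  | cons h t ih =>
    intro fuel acc hf
    cases fuel with
    | zero => simp at hf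
    | succ f =>
      simp only [PySem.Chars.count.go, List.isPrefixOf, Bool.and_true]
      by_cases hc : h = '\n'
      · simp [hc, ih f (acc + 1) (by simpa using hf)]
        omega
      · have hb : ('\n' == h) = false := beq_eq_false_iff_ne.mpr (Ne.symm hc)
        simp [hb, ih f acc (by simpa using hf), List.count_cons]
        exact hc

theorem count_singleton (s : List Char) : PySem.Chars.count s ['\n'] = s.count '\n' := by
  simp [PySem.Chars.count, countGo_singleton s s.length 0 le_rfl]

theorem isPrefixOf_singleton (xs : List Char) :
    (['\n'].isPrefixOf xs) = (xs.head? == some '\n') := by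
  cases xs with
  | nil => simp
  | cons a t => simp [List.isPrefixOf, BEq.comm]

theorem rfindGo_succ (l : List Char) (j : Nat) :
    PySem.Chars.rfind.go l ['\n'] (j + 1) =
      if ['\n'].isPrefixOf (l.drop (j + 1)) then ((j : Int) + 1) else PySem.Chars.rfind.go l ['\n'] j := by
  simp [PySem.Chars.rfind.go]

theorem rfindGo_zero (l : List Char) :
    PySem.Chars.rfind.go l ['\n'] 0 = if ['\n'].isPrefixOf l then 0 else -1 := by
  simp [PySem.Chars.rfind.go]

theorem rfindGo_append_stable (l : List Char) (c : Char) (hc : c ≠ '\n') :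
    ∀ k, k ≤ l.length → PySem.Chars.rfind.go (l ++ [c]) ['\n'] k = PySem.Chars.rfind.go l ['\n'] k := by
  intro k
  induction k with
  | zero =>
    intro _
    rw [rfindGo_zero, rfindGo_zero, isPrefixOf_singleton, isPrefixOf_singleton]
    cases l with
    | nil => simp; exact hc
    | cons a t => simp
  | succ j ih =>
    intro hk
    rw [rfindGo_succ, rfindGo_succ, isPrefixOf_singleton, isPrefixOf_singleton, ih (by omega)]
    by_cases hj : j + 1 < l.length
    · rw [List.head?_drop, List.head?_drop, List.getElem?_append_left hj]
    · have hlen : j + 1 = l.length := by omega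
      rw [List.head?_drop, List.head?_drop, hlen]
      simp
      exact fun h => absurd h hc

theorem rfind_append (l : List Char) (c : Char) :
    PySem.Chars.rfind (l ++ [c]) ['\n'] =
      if c = '\n' then (l.length : Int) else PySem.Chars.rfind l ['\n'] := by
  unfold PySem.Chars.rfind
  have hlen : (l ++ [c]).length = l.length + 1 := by simp
  rw [hlen, rfindGo_succ]
  have hdrop : (l ++ [c]).drop (l.length + 1) = [] := by
    simp
  rw [hdrop]
  simp only [List.isPrefixOf, if_neg Bool.false_ne_true]
  cases hl : l.length with
  | zero =>
    have : l = [] := List.eq_nil_of_length_eq_zero hl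
    subst this
    rw [rfindGo_zero, rfindGo_zero, isPrefixOf_singleton, isPrefixOf_singleton]
    by_cases hc : c = '\n' <;> simp [hc]
  | succ m =>
    rw [rfindGo_succ]
    have hd1 : (l ++ [c]).drop (m + 1) = [c] := by
      rw [List.drop_append_of_le_length (by omega), List.drop_of_length_le (by omega)]
      simp
    rw [hd1, isPrefixOf_singleton]
    by_cases hc : c = '\n'
    · simp [hc]
    · have hbc : (some c == some '\n') = false := by
        simp [hc]
      rw [if_neg hc, List.head?_cons, hbc, if_neg (by simp)]
      rw [rfindGo_append_stable l c hc m (by omega), rfindGo_succ]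
      have : l.drop (m + 1) = [] := List.drop_of_length_le (by omega)
      rw [this]
      simp [List.isPrefixOf]

theorem rfind_singleton (l : List Char) (h : '\n' ∈ l) :
    PySem.Chars.rfind l ['\n'] =
      (l.length : Int) - 1 - ((l.reverse.takeWhile (fun c => c != '\n')).length : Int) := by
  induction l using List.reverseRecOn with
  | nil => simp at h
  | append_singleton l c ih =>
    rw [rfind_append]
    by_cases hc : c = '\n'
    · simp [hc]
    · have hmem : '\n' ∈ l := by
        rcases List.mem_append.mp h with h1 | h2
        · exact h1
        · simp at h2; exact absurd h2.symm hc
      have hcb : (c != '\n') = true := by simp [hc]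
      rw [if_neg hc, ih hmem]
      simp [hcb]
      ring

theorem foldA_eq (l : List Char) (line col : Int) :
    l.foldl (fun st c => if c = '\n' then (st.1 + 1, 1) else (st.1, st.2 + 1)) (line, col) =
      (line + (l.count '\n' : Int),
       if l.count '\n' = 0 then col + (l.length : Int)
       else ((l.reverse.takeWhile (fun c => c != '\n')).length : Int) + 1) := by
  induction l using List.reverseRecOn generalizing line col with
  | nil => simp
  | append_singleton l c ih =>
    rw [List.foldl_append, ih]
    by_cases hc : c = '\n'
    · simp [hc, List.count_append]
      omega
    · have hcb : (c != '\n') = true := by simp [hc]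
      have hcnt : (l ++ [c]).count '\n' = l.count '\n' := by
        simp [List.count_append, List.count_singleton]
        exact hc
      simp only [List.foldl_cons, List.foldl_nil, if_neg hc, hcnt]
      by_cases h0 : l.count '\n' = 0
      · simp [h0]
        omega
      · simp [h0, hcb]

-- ===== VERDICT (by name: the statement is the Claim_ definition above) =====
theorem advance_position_py_spec : Claim_equal_advance_position_py := by
  intro text line col _
  unfold Spec_advance_position_py advance_position_py advance_position_py_alt
  have hnl : "\n".toList = ['\n'] := by decide
  rw [foldA_eq, PySem.Str.count_eq, hnl, count_singleton, PySem.Str.len_eq, PySem.Str.rfind_eq]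
  by_cases h0 : text.toList.count '\n' = 0
  · simp [h0]
  · have hmem : '\n' ∈ text.toList := by
      by_contra hm
      exact h0 (List.count_eq_zero.mpr hm)
    simp only [hnl]
    rw [rfind_singleton text.toList hmem]
    simp [h0]
    omega
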